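-- pv_equiv track=rewrite | github.com/johnlaidler267/SpotifyGPT | ImportSongs.py | organize_songs_by_decade
-- ===== SOURCE A (Python) =====
-- def organize_songs_by_decade(liked_songs):
--     organized_songs = {}
--
--     # Loop through each liked song
--     for song_id, song_info in liked_songs.items():
--
--         # Extract the release decade of the song
--         release_decade = song_info["release_decade"]
--
--         # Create a new key for the decade if it doesn't exist
--         if release_decade not in organized_songs:
--             organized_songs[release_decade] = []
--
--         # Append the song info to the list of songs for that decade
--         organized_songs[release_decade].append(song_info)
--
--     return organized_songs
-- ===== SOURCE B (Python) =====
-- def organize_songs_by_decade(liked_songs):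
--     # Two-pass grouping: collect the distinct decades in first-occurrence order,
--     # then build each decade's list with one filtering comprehension per decade.
--     infos = list(liked_songs.values())
--     decades = []
--     for info in infos:
--         d = info["release_decade"]
--         if d not in decades:
--             decades.append(d)
--     return {d: [info for info in infos if info["release_decade"] == d]
--             for d in decades}
-- ===== Notes on version B (the rewrite author's own statement) =====
-- stated objective: alternative
-- what changed: A accumulates a dict of lists in one pass with per-item membership test and append; B makes two passes: it first collects the distinct release decades in first-occurrence order, then builds each decade's list with one filtering comprehension per decade. Pre_ excludes song_infos lacking a 'release_decade' key (A raises KeyError) and association lists with duplicate keys at either level, which do not denote a Python dict.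
import Mathlib
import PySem

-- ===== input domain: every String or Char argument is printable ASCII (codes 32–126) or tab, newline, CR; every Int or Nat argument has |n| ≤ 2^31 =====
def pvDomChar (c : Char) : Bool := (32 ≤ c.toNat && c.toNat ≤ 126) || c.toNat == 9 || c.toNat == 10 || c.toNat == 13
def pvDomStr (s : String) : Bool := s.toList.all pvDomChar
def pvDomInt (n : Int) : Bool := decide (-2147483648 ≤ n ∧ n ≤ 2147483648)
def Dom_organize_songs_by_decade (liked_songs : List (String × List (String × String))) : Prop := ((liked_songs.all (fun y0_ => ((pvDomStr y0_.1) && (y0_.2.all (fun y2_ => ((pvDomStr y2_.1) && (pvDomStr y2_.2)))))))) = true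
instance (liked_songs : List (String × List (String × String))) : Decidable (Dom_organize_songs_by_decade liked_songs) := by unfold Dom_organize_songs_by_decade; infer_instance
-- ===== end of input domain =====

-- B replaces A's incremental dict-of-lists insertion by a two-pass decomposition
-- (distinct decades first, then one filter per decade); objective: alternative structure, not speed.

-- ===== PORT A =====
-- song_info["release_decade"]: first-match dict lookup; KeyError (none) is excluded by Pre_,
-- the port reads the default "" there.
def pvDecade (song_info : List (String × String)) : String :=
  ((PySem.Dict.mk song_info).get? "release_decade").getD ""

def organize_songs_by_decade (liked_songs : List (String × List (String × String))) : List (String × List (List (String × String))) :=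
  (liked_songs.foldl
    (fun organized kv =>
      let song_info := kv.2
      let release_decade := pvDecade song_info
      -- if release_decade not in organized_songs: organized_songs[release_decade] = []
      let organized1 := if organized.contains release_decade then organized
                        else organized.insert release_decade []
      -- organized_songs[release_decade].append(song_info)
      organized1.insert release_decade (organized1.getD release_decade [] ++ [song_info]))
    (PySem.Dict.empty : PySem.Dict String (List (List (String × String))))).items

-- ===== PORT B =====
-- decades: distinct release decades in first-occurrence order
def altDecades (infos : List (List (String × String))) : List String :=
  infos.foldl
    (fun decades info =>
      let d := pvDecade info
      if decades.contains d then decades else decades ++ [d])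
    []

def organize_songs_by_decade_alt (liked_songs : List (String × List (String × String))) : List (String × List (List (String × String))) :=
  let infos := liked_songs.map (·.2)
  (altDecades infos).map (fun d => (d, infos.filter (fun info => pvDecade info == d)))

-- ===== PRECONDITION & SPEC =====
-- Pre_ excludes (a) song_infos without a "release_decade" key, where A raises KeyError, and
-- (b) association lists with duplicate keys at either level, which do not denote a Python dict
-- (dict construction collapses duplicates before A ever runs).
def Pre_organize_songs_by_decade (liked_songs : List (String × List (String × String))) : Prop :=
  (liked_songs.map (·.1)).Nodup ∧
  ∀ kv ∈ liked_songs, (kv.2.map (·.1)).Nodup ∧ "release_decade" ∈ kv.2.map (·.1)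
instance (liked_songs : List (String × List (String × String))) : Decidable (Pre_organize_songs_by_decade liked_songs) := by unfold Pre_organize_songs_by_decade; infer_instance

def pvWitness_organize_songs_by_decade : (List (String × List (String × String))) :=
  [("id1", [("release_decade", "1980s"), ("title", "a")]),
   ("id2", [("release_decade", "1990s")]),
   ("id3", [("release_decade", "1980s"), ("title", "c")])]

def Spec_organize_songs_by_decade (liked_songs : List (String × List (String × String))) (out : List (String × List (List (String × String)))) : Prop := out = organize_songs_by_decade_alt liked_songs
instance (liked_songs : List (String × List (String × String))) (out : List (String × List (List (String × String)))) : Decidable (Spec_organize_songs_by_decade liked_songs out) := by unfold Spec_organize_songs_by_decade; infer_instance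

-- ===== CLAIM (what is proved, stated in full; the proofs are below) =====
def Claim_equal_organize_songs_by_decade : Prop := ∀ (liked_songs : List (String × List (String × String))), Dom_organize_songs_by_decade liked_songs → Pre_organize_songs_by_decade liked_songs → Spec_organize_songs_by_decade liked_songs (organize_songs_by_decade liked_songs)

-- ===== LEMMAS AND PROOFS =====

-- A's loop body is dict.modify at the decade key.
theorem stepA_eq_modify (organized : PySem.Dict String (List (List (String × String))))
    (kv : String × List (String × String)) :
    (let organized1 := if organized.contains (pvDecade kv.2) then organized
                       else organized.insert (pvDecade kv.2) []
     organized1.insert (pvDecade kv.2) (organized1.getD (pvDecade kv.2) [] ++ [kv.2]))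
    = organized.modify (pvDecade kv.2) [] (· ++ [kv.2]) := by
  by_cases h : organized.contains (pvDecade kv.2)
  · simp [h, PySem.Dict.modify]
  · simp only [h, Bool.false_eq_true, if_false]
    rw [PySem.Dict.getD_insert_self, PySem.Dict.insert_insert_self, PySem.Dict.modify,
      PySem.Dict.getD_of_not_contains _ _ (by simpa using h)]

theorem altDecades_eq_ofList (infos : List (List (String × String))) :
    altDecades infos = PySem.Set.ofList (infos.map pvDecade) := by
  rw [PySem.Set.ofList_eq_foldl, List.foldl_map]
  rfl

theorem organize_songs_by_decade_spec' (liked_songs : List (String × List (String × String))) :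
    organize_songs_by_decade liked_songs = organize_songs_by_decade_alt liked_songs := by
  unfold organize_songs_by_decade organize_songs_by_decade_alt
  have hfold : liked_songs.foldl
      (fun organized kv =>
        let song_info := kv.2
        let release_decade := pvDecade song_info
        let organized1 := if organized.contains release_decade then organized
                          else organized.insert release_decade []
        organized1.insert release_decade (organized1.getD release_decade [] ++ [song_info]))
      (PySem.Dict.empty : PySem.Dict String (List (List (String × String))))
      = liked_songs.foldl (fun organized kv => organized.modify (pvDecade kv.2) [] (· ++ [kv.2]))
        PySem.Dict.empty := by
    exact PySem.List.foldl_congr_mem _ _ _ _ (fun d kv _ => stepA_eq_modify d kv)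
  rw [hfold]
  have hfold2 : liked_songs.foldl (fun organized kv => organized.modify (pvDecade kv.2) [] (· ++ [kv.2]))
      (PySem.Dict.empty : PySem.Dict String (List (List (String × String))))
      = (liked_songs.map (fun kv => (pvDecade kv.2, kv.2))).foldl
          (fun organized p => organized.modify p.1 [] (· ++ [p.2])) PySem.Dict.empty := by
    rw [List.foldl_map]
  rw [hfold2]
  set l := liked_songs.map (fun kv => (pvDecade kv.2, kv.2)) with hl
  set D := l.foldl (fun organized p => organized.modify p.1 [] (· ++ [p.2]))
      (PySem.Dict.empty : PySem.Dict String (List (List (String × String)))) with hD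
  have hnodup : D.keys.Nodup := by
    rw [hD]
    exact PySem.Dict.nodup_keys_foldl_modify_key l Prod.fst [] (fun d p => (· ++ [p.2])) _
      (by simp [PySem.Dict.keys_empty])
  have hkeys : D.keys = altDecades (liked_songs.map (·.2)) := by
    rw [hD, PySem.Dict.keys_foldl_modify_key, PySem.Dict.keys_empty, PySem.Set.update_nil_left,
      altDecades_eq_ofList, hl]
    simp [List.map_map, Function.comp_def]
  have hitems : D.items = D.keys.map (fun k => (k, D.getD k [])) :=
    PySem.Dict.items_eq_map_keys D hnodup []
  rw [hitems, hkeys]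
  apply List.map_congr_left
  intro d _
  have hg : D.getD d [] = (l.filter (fun p => p.1 == d)).map (·.2) := by
    rw [hD, PySem.Dict.getD_foldl_modify_append, PySem.Dict.getD_empty]
    simp
  rw [hg, hl]
  simp [List.filter_map, List.map_map, Function.comp_def]

-- ===== VERDICT (by name: the statement is the Claim_ definition above) =====
theorem organize_songs_by_decade_spec : Claim_equal_organize_songs_by_decade := by
  intro liked_songs _ _
  exact organize_songs_by_decade_spec' liked_songs
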